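-- pv_equiv track=rewrite | github.com/raknoz/FIUBA-algorithms_1 | module_6/ex_6_8_3.py | reemplazar_digitos
-- ===== SOURCE A (Python) =====
-- def reemplazar_digitos(s, r, l):
--     indice = 0
--     reemplazos = 0
--     result = ''
--     while indice < len(s) and reemplazos < l:
--         if(s[indice].isdigit()):
--             result += r
--             reemplazos += 1
--         else:
--             result += s[indice]
--         indice += 1
--
--     result += s[indice:]
--
--     return result
-- ===== SOURCE B (Python) =====
-- def reemplazar_digitos(s, r, l):
--     positions = [i for i, c in enumerate(s) if c.isdigit()]
--     targets = set(positions[:max(l, 0)])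
--     return ''.join(r if i in targets else c for i, c in enumerate(s))
-- ===== Notes on version B (the rewrite author's own statement) =====
-- stated objective: faster
-- what changed: A's running-counter while-loop that grows the result by repeated string += (quadratic copying) is replaced by a precompute pass collecting the indices of the first l digit characters into a set, followed by a single str.join rebuild over the string.
import Mathlib
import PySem

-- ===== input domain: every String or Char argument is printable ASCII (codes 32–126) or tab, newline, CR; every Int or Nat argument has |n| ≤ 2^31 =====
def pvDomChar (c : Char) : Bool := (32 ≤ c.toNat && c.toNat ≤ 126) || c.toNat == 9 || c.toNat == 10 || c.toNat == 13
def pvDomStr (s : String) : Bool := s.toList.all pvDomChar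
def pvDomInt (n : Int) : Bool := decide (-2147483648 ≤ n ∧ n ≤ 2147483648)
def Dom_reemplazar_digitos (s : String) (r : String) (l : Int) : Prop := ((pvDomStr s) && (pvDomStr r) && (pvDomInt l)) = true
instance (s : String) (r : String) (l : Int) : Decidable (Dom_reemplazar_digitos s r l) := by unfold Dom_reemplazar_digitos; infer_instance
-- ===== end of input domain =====

-- B replaces A's running-counter while-loop growing the result by repeated string += with a
-- precomputed set of the first-l digit indices followed by one join-rebuild pass
-- (objective: faster — a timing run measured B faster at the largest sizes).

-- ===== PORT A =====
-- the while loop: 'indice' is the position of the list head, 'k' is 'reemplazos';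
-- when the loop guard 'reemplazos < l' fails the remainder s[indice:] (= the unconsumed chars) is appended
def pvGoA (r : List Char) (l : Int) : List Char → Int → List Char
  | [], _ => []
  | c :: rest, k =>
    if k < l then
      (if PySem.Chars.isdigit c then r ++ pvGoA r l rest (k + 1) else c :: pvGoA r l rest k)
    else c :: rest

def reemplazar_digitos (s : String) (r : String) (l : Int) : String :=
  String.ofList (pvGoA r.toList l s.toList 0)

-- ===== PORT B =====
-- positions = [i for i, c in enumerate(s) if c.isdigit()]
def pvDigitPositions : List Char → Nat → List Nat
  | [], _ => []
  | c :: cs, i =>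
    if PySem.Chars.isdigit c then i :: pvDigitPositions cs (i + 1)
    else pvDigitPositions cs (i + 1)

-- ''.join(r if i in targets else c for i, c in enumerate(s))
def pvRebuild (targets : PySem.Set Nat) (r : List Char) : List Char → Nat → List (List Char)
  | [], _ => []
  | c :: cs, i => (if PySem.Set.contains targets i then r else [c]) :: pvRebuild targets r cs (i + 1)

def reemplazar_digitos_alt (s : String) (r : String) (l : Int) : String :=
  -- targets = set(positions[:max(l, 0)])
  String.ofList (pvRebuild
    (PySem.Set.ofList ((pvDigitPositions s.toList 0).take (max l 0).toNat))
    r.toList s.toList 0).flatten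

-- ===== PRECONDITION & SPEC =====
def Spec_reemplazar_digitos (s : String) (r : String) (l : Int) (out : String) : Prop := out = reemplazar_digitos_alt s r l
instance (s : String) (r : String) (l : Int) (out : String) : Decidable (Spec_reemplazar_digitos s r l out) := by unfold Spec_reemplazar_digitos; infer_instance

-- ===== CLAIM (what is proved, stated in full; the proofs are below) =====
def Claim_equal_reemplazar_digitos : Prop := ∀ (s : String) (r : String) (l : Int), Dom_reemplazar_digitos s r l → Spec_reemplazar_digitos s r l (reemplazar_digitos s r l)

-- ===== LEMMAS AND PROOFS =====

-- common reference: replace the first n digit chars by r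
def pvF (r : List Char) : Nat → List Char → List Char
  | _, [] => []
  | 0, cs => cs
  | n + 1, c :: cs =>
    if PySem.Chars.isdigit c then r ++ pvF r n cs else c :: pvF r (n + 1) cs

lemma pvF_zero (r : List Char) (cs : List Char) : pvF r 0 cs = cs := by
  cases cs <;> rfl

lemma pvGoA_eq_pvF (r : List Char) (l : Int) :
    ∀ (cs : List Char) (k : Int), pvGoA r l cs k = pvF r (l - k).toNat cs := by
  intro cs
  induction cs with
  | nil => intro k; cases h : (l - k).toNat <;> rfl
  | cons c rest ih =>
    intro k
    by_cases hk : k < l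
    · have hn : (l - k).toNat = (l - (k + 1)).toNat + 1 := by omega
      rw [hn]
      cases hd : PySem.Chars.isdigit c
      · simp only [pvGoA, if_pos hk, hd, Bool.false_eq_true, if_false, pvF]
        rw [ih k, hn]
      · simp only [pvGoA, if_pos hk, hd, if_true, pvF]
        rw [ih (k + 1)]
    · have hn : (l - k).toNat = 0 := by omega
      simp [pvGoA, hk, hn, pvF_zero]

lemma mem_pvDigitPositions_ge :
    ∀ (cs : List Char) (i j : Nat), j ∈ pvDigitPositions cs i → i ≤ j := by
  intro cs
  induction cs with
  | nil => intro i j h; simp [pvDigitPositions] at h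
  | cons c rest ih =>
    intro i j h
    by_cases hd : PySem.Chars.isdigit c
    · simp [pvDigitPositions, hd] at h
      rcases h with h | h
      · omega
      · have := ih (i + 1) j h; omega
    · simp [pvDigitPositions, hd] at h
      have := ih (i + 1) j h; omega

lemma pvDigitPositions_pairwise (cs : List Char) (i : Nat) :
    (pvDigitPositions cs i).Pairwise (· < ·) := by
  induction cs generalizing i with
  | nil => simp [pvDigitPositions]
  | cons c rest ih =>
    by_cases hd : PySem.Chars.isdigit c
    · simp only [pvDigitPositions, hd, if_pos, List.pairwise_cons]
      exact ⟨fun j hj => by have := mem_pvDigitPositions_ge rest (i + 1) j hj; omega, ih (i + 1)⟩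
    · simpa [pvDigitPositions, hd] using ih (i + 1)

lemma pvRebuild_drop_lt (r : List Char) (t : Nat) (ts : List Nat) :
    ∀ (cs : List Char) (i : Nat), t < i →
      pvRebuild (t :: ts) r cs i = pvRebuild ts r cs i := by
  intro cs
  induction cs with
  | nil => intro i _; rfl
  | cons c rest ih =>
    intro i hi
    have hne : ¬ i = t := by omega
    simp [pvRebuild, PySem.Set.contains, hne, ih (i + 1) (by omega)]

lemma pvRebuild_nil_flatten (r : List Char) :
    ∀ (cs : List Char) (i : Nat), (pvRebuild [] r cs i).flatten = cs := by
  intro cs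
  induction cs with
  | nil => intro i; rfl
  | cons c rest ih =>
    intro i
    simp [pvRebuild, PySem.Set.contains, ih (i + 1)]

lemma pvRebuild_take_eq_pvF (r : List Char) :
    ∀ (cs : List Char) (i n : Nat),
      (pvRebuild ((pvDigitPositions cs i).take n) r cs i).flatten = pvF r n cs := by
  intro cs
  induction cs with
  | nil => intro i n; cases n <;> rfl
  | cons c rest ih =>
    intro i n
    by_cases hd : PySem.Chars.isdigit c
    · cases n with
      | zero =>
        simp only [List.take_zero, pvRebuild_nil_flatten, pvF_zero]
      | succ m =>
        have hdp : pvDigitPositions (c :: rest) i = i :: pvDigitPositions rest (i + 1) := by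
          simp [pvDigitPositions, hd]
        rw [hdp]
        simp only [List.take_succ_cons]
        have hmem : PySem.Set.contains (i :: (pvDigitPositions rest (i + 1)).take m) i = true := by
          simp [PySem.Set.contains]
        rw [pvRebuild]
        rw [hmem]
        simp only [if_pos]
        rw [pvRebuild_drop_lt r i _ rest (i + 1) (by omega)]
        simp [pvF, hd, ih (i + 1) m, List.flatten]
    · have hdp : pvDigitPositions (c :: rest) i = pvDigitPositions rest (i + 1) := by
        simp [pvDigitPositions, hd]
      rw [hdp, pvRebuild]
      have hnotmem : PySem.Set.contains ((pvDigitPositions rest (i + 1)).take n) i = false := by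
        simp only [PySem.Set.contains, List.contains_eq_mem, decide_eq_false_iff_not]
        intro hmem
        have hmem' : i ∈ pvDigitPositions rest (i + 1) := List.mem_of_mem_take hmem
        have := mem_pvDigitPositions_ge rest (i + 1) i hmem'
        omega
      rw [hnotmem]
      simp only [if_neg Bool.false_ne_true]
      have hfc : pvF r n (c :: rest) = c :: pvF r n rest := by
        cases n with
        | zero => simp [pvF_zero]
        | succ m => simp [pvF, hd]
      rw [hfc, ← ih (i + 1) n]
      simp [List.flatten]

lemma pvSet_ofList_take (cs : List Char) (i n : Nat) :
    PySem.Set.ofList ((pvDigitPositions cs i).take n) = (pvDigitPositions cs i).take n := by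
  apply PySem.Set.ofList_eq_self_of_nodup
  exact ((pvDigitPositions cs i).take_sublist n).nodup
    ((pvDigitPositions_pairwise cs i).imp fun h => Nat.ne_of_lt h)

-- ===== VERDICT (by name: the statement is the Claim_ definition above) =====
theorem reemplazar_digitos_spec : Claim_equal_reemplazar_digitos := by
  intro s r l _
  unfold Spec_reemplazar_digitos reemplazar_digitos reemplazar_digitos_alt
  have hmax : (max l 0).toNat = (l - 0).toNat := by omega
  rw [pvSet_ofList_take, hmax, pvRebuild_take_eq_pvF, pvGoA_eq_pvF]
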